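-- pv_equiv track=rewrite | github.com/CornellDataScience/Yelp | salt-baes/Veronica/yelphelpers_vmo5.py | ElitePatternof4
-- ===== SOURCE A (Python) =====
-- def ElitePatternof4(thisyear, nextyear, users):
--     '''Returns elite pattern in following list:
--     (1) elite this year | non-elite next year E.N.
--     (2) elite this year | elite next year E.E.
--     (3) non-elite this year | elite next year N.E.
--     (4) non-elite this year | non-elite next year N.N.
--     thisyear: unicode or string of year1
--     nextyear: unicode or string of year2
--     users: user list from Yelp Dataset'''
--
--     patternlist = [0, 0, 0, 0] #EN, EE, NE, NN
--     for eachuser in range(len(users)):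
--         elite = users[eachuser][u'elite']
--         if elite[0] != u'None':
--             if (thisyear in elite) and (nextyear not in elite):
--                 patternlist[0]+=1
--             elif (thisyear in elite) and (nextyear in elite):
--                 patternlist[1]+=1
--             elif (thisyear not in elite) and (nextyear in elite):
--                 patternlist[2]+=1
--             else:
--                 patternlist[3]+=1
--     return patternlist
-- ===== SOURCE B (Python) =====
-- def ElitePatternof4(thisyear, nextyear, users):
--     elites = [u[u'elite'] for u in users]
--     qual = [e for e in elites if e[0] != u'None']
--     t = sum(1 for e in qual if thisyear in e)
--     n = sum(1 for e in qual if nextyear in e)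
--     b = sum(1 for e in qual if thisyear in e and nextyear in e)
--     return [t - b, b, n - b, len(qual) - t - n + b]
-- ===== Notes on version B (the rewrite author's own statement) =====
-- stated objective: alternative
-- what changed: B replaces A's per-user if/elif bucket classification with three membership counts (thisyear, nextyear, both) over the qualifying elite lists and recovers the four buckets by inclusion-exclusion arithmetic.
import Mathlib
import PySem

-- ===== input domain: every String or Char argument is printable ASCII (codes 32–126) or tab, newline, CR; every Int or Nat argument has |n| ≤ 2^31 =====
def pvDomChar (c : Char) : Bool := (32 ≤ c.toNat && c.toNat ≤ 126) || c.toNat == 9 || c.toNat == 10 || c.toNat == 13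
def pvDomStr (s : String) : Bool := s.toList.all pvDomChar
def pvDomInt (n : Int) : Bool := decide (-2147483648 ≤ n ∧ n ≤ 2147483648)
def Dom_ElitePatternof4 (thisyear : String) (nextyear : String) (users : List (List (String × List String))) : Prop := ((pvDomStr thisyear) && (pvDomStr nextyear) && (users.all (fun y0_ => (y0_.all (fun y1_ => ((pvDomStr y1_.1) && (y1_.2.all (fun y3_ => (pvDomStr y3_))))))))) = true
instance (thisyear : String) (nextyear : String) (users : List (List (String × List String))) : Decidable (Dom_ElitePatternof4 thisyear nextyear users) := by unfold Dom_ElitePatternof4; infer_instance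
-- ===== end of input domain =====

-- B replaces A's per-user if/elif bucket walk by three membership counts over the qualifying
-- elite lists and recovers the four buckets by inclusion–exclusion arithmetic (objective: alternative).


-- ===== PORT A =====
-- patternlist[k] += 1  (index always 0..3, in range)
def pvBumpA (pl : List Int) (k : Int) : List Int :=
  PySem.List.pySetD pl k (PySem.List.pyGetD pl k 0 + 1)

-- one iteration of A's loop body, on the user users[eachuser]
def pvStepA (thisyear nextyear : String) (pl : List Int) (user : List (String × List String)) : List Int :=
  match List.lookup "elite" user with    -- users[eachuser][u'elite']; none = KeyError (excluded by Pre_)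
  | none => pl
  | some elite =>
    match PySem.List.pyGet? elite 0 with -- elite[0]; none = IndexError (excluded by Pre_)
    | none => pl
    | some e0 =>
      if e0 ≠ "None" then
        if thisyear ∈ elite ∧ nextyear ∉ elite then pvBumpA pl 0
        else if thisyear ∈ elite ∧ nextyear ∈ elite then pvBumpA pl 1
        else if thisyear ∉ elite ∧ nextyear ∈ elite then pvBumpA pl 2
        else pvBumpA pl 3
      else pl

def ElitePatternof4 (thisyear : String) (nextyear : String) (users : List (List (String × List String))) : List Int :=
  (PySem.List.pyRange 0 users.length 1).foldl
    (fun pl i => pvStepA thisyear nextyear pl (PySem.List.pyGetD users i []))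
    [0, 0, 0, 0]

-- ===== PORT B =====
def ElitePatternof4_alt (thisyear : String) (nextyear : String) (users : List (List (String × List String))) : List Int :=
  let elites := users.map (fun u => (List.lookup "elite" u).getD [])      -- [u['elite'] for u in users]
  let qual := elites.filter (fun e => PySem.List.pyGetD e 0 "" ≠ "None")  -- [e for e in elites if e[0] != 'None']
  let t : Int := qual.countP (fun e => thisyear ∈ e)
  let n : Int := qual.countP (fun e => nextyear ∈ e)
  let b : Int := qual.countP (fun e => thisyear ∈ e ∧ nextyear ∈ e)
  [t - b, b, n - b, (qual.length : Int) - t - n + b]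

-- ===== PRECONDITION & SPEC =====
-- Pre_ excludes exactly the inputs on which A raises: a user dict without an 'elite' key
-- (KeyError) or with an empty 'elite' list (IndexError on elite[0]); B raises there too.
def Pre_ElitePatternof4 (thisyear : String) (nextyear : String) (users : List (List (String × List String))) : Prop :=
  users.all (fun u => match List.lookup "elite" u with
                      | some e => !e.isEmpty
                      | none => false) = true
instance (thisyear : String) (nextyear : String) (users : List (List (String × List String))) : Decidable (Pre_ElitePatternof4 thisyear nextyear users) := by unfold Pre_ElitePatternof4; infer_instance

def pvWitness_ElitePatternof4 : String × String × (List (List (String × List String))) :=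
  ("2010", "2011", [[("elite", ["2010", "2011"])], [("elite", ["None"])], [("elite", ["2011"])]])

def Spec_ElitePatternof4 (thisyear : String) (nextyear : String) (users : List (List (String × List String))) (out : List Int) : Prop := out = ElitePatternof4_alt thisyear nextyear users
instance (thisyear : String) (nextyear : String) (users : List (List (String × List String))) (out : List Int) : Decidable (Spec_ElitePatternof4 thisyear nextyear users out) := by unfold Spec_ElitePatternof4; infer_instance

-- ===== CLAIM (what is proved, stated in full; the proofs are below) =====
def Claim_equal_ElitePatternof4 : Prop := ∀ (thisyear : String) (nextyear : String) (users : List (List (String × List String))), Dom_ElitePatternof4 thisyear nextyear users → Pre_ElitePatternof4 thisyear nextyear users → Spec_ElitePatternof4 thisyear nextyear users (ElitePatternof4 thisyear nextyear users)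

-- ===== LEMMAS AND PROOFS =====

-- the qualifying elite lists of a user list
def pvQual (users : List (List (String × List String))) : List (List String) :=
  (users.map (fun u => (List.lookup "elite" u).getD [])).filter
    (fun e => PySem.List.pyGetD e 0 "" ≠ "None")

theorem pvQual_cons (u : List (String × List String)) (us : List (List (String × List String))) :
    pvQual (u :: us) =
      if PySem.List.pyGetD ((List.lookup "elite" u).getD []) 0 "" ≠ "None"
      then ((List.lookup "elite" u).getD []) :: pvQual us else pvQual us := by
  simp only [pvQual, List.map_cons, List.filter_cons]
  split <;> split <;> simp_all

-- A's accumulator after folding a user list, in terms of countP over the qualifying elites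
theorem pvFoldA (thisyear nextyear : String) (us : List (List (String × List String)))
    (a b c d : Int)
    (hpre : Pre_ElitePatternof4 thisyear nextyear us) :
    us.foldl (pvStepA thisyear nextyear) [a, b, c, d] =
      [a + ((pvQual us).countP (fun e => decide (thisyear ∈ e) && !decide (nextyear ∈ e)) : Int),
       b + ((pvQual us).countP (fun e => decide (thisyear ∈ e) && decide (nextyear ∈ e)) : Int),
       c + ((pvQual us).countP (fun e => !decide (thisyear ∈ e) && decide (nextyear ∈ e)) : Int),
       d + ((pvQual us).countP (fun e => !decide (thisyear ∈ e) && !decide (nextyear ∈ e)) : Int)] := by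
  induction us generalizing a b c d with
  | nil => simp [pvQual]
  | cons u us ih =>
    simp only [Pre_ElitePatternof4, List.all_cons, Bool.and_eq_true] at hpre
    obtain ⟨hu, hpre'⟩ := hpre
    have hpre' : Pre_ElitePatternof4 thisyear nextyear us := hpre'
    obtain ⟨e, he, hne⟩ : ∃ e, List.lookup "elite" u = some e ∧ e ≠ [] := by
      cases h : List.lookup "elite" u with
      | none => simp [h] at hu
      | some e => exact ⟨e, rfl, by simp [h] at hu; simpa [List.isEmpty_iff] using hu⟩
    obtain ⟨e0, es, rfl⟩ : ∃ e0 es, e = e0 :: es := by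
      cases e with
      | nil => exact absurd rfl hne
      | cons e0 es => exact ⟨e0, es, rfl⟩
    rw [List.foldl_cons, pvQual_cons, he]
    simp only [Option.getD_some, PySem.List.pyGetD_zero_cons, pvStepA, he,
      PySem.List.pyGet?_zero_cons]
    by_cases h0 : e0 = "None"
    · simp [h0, ih _ _ _ _ hpre']
    · by_cases ht : thisyear ∈ e0 :: es <;> by_cases hn : nextyear ∈ e0 :: es <;>
        simp [h0, ht, hn, pvBumpA, PySem.List.pySetD, PySem.List.pySet?,
          PySem.List.pyGetD, PySem.List.pyGet?, PySem.List.pyIdx?,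
          ih _ _ _ _ hpre'] <;> omega

-- inclusion–exclusion identities on countP over any list of elite lists
theorem pvCountP_and (P Q : List String → Prop) [DecidablePred P] [DecidablePred Q]
    (l : List (List String)) :
    l.countP (fun e => decide (P e ∧ Q e)) = l.countP (fun e => decide (P e) && decide (Q e)) :=
  List.countP_congr (fun e _ => by simp)

theorem pvCount_tn (thisyear nextyear : String) (l : List (List String)) :
    (l.countP (fun e => decide (thisyear ∈ e) && !decide (nextyear ∈ e)) : Int) =
      (l.countP (fun e => thisyear ∈ e) : Int) -
      (l.countP (fun e => decide (thisyear ∈ e) && decide (nextyear ∈ e)) : Int) := by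
  induction l with
  | nil => simp
  | cons e l ih =>
    by_cases ht : thisyear ∈ e <;> by_cases hn : nextyear ∈ e <;>
      simp [ht, hn] <;> omega

theorem pvCount_nt (thisyear nextyear : String) (l : List (List String)) :
    (l.countP (fun e => !decide (thisyear ∈ e) && decide (nextyear ∈ e)) : Int) =
      (l.countP (fun e => nextyear ∈ e) : Int) -
      (l.countP (fun e => decide (thisyear ∈ e) && decide (nextyear ∈ e)) : Int) := by
  induction l with
  | nil => simp
  | cons e l ih =>
    by_cases ht : thisyear ∈ e <;> by_cases hn : nextyear ∈ e <;>
      simp [ht, hn] <;> omega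

theorem pvCount_nn (thisyear nextyear : String) (l : List (List String)) :
    (l.countP (fun e => !decide (thisyear ∈ e) && !decide (nextyear ∈ e)) : Int) =
      (l.length : Int) - (l.countP (fun e => thisyear ∈ e) : Int) -
      (l.countP (fun e => nextyear ∈ e) : Int) +
      (l.countP (fun e => decide (thisyear ∈ e) && decide (nextyear ∈ e)) : Int) := by
  induction l with
  | nil => simp
  | cons e l ih =>
    by_cases ht : thisyear ∈ e <;> by_cases hn : nextyear ∈ e <;>
      simp [ht, hn] <;> omega

-- ===== VERDICT (by name: the statement is the Claim_ definition above) =====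
theorem ElitePatternof4_spec : Claim_equal_ElitePatternof4 := by
  intro thisyear nextyear users _hdom hpre
  show ElitePatternof4 thisyear nextyear users = ElitePatternof4_alt thisyear nextyear users
  unfold ElitePatternof4 ElitePatternof4_alt
  rw [PySem.List.foldl_pyRange_zero_pyGetD' users [] (pvStepA thisyear nextyear) [0, 0, 0, 0]]
  rw [pvFoldA thisyear nextyear users 0 0 0 0 hpre]
  have hq : ((users.map (fun u => (List.lookup "elite" u).getD [])).filter
      (fun e => PySem.List.pyGetD e 0 "" ≠ "None")) = pvQual users := rfl
  simp only [hq, pvCountP_and (fun e => thisyear ∈ e) (fun e => nextyear ∈ e),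
    pvCount_tn, pvCount_nt, pvCount_nn]
  norm_num
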